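-- pv_equiv track=rewrite | github.com/rebornyhy/ReplanKG | get_retr_plan.py | find_unique_longest_list
-- ===== SOURCE A (Python) =====
-- def find_unique_longest_list(lst_of_lists):
--     if not lst_of_lists:
--         return []
--
--     # 计算每个子列表的长度
--     lengths = [len(sublist) for sublist in lst_of_lists]
--     max_length = max(lengths)
--
--     # 找出所有长度等于最大长度的子列表索引
--     max_length_indices = [i for i, length in enumerate(lengths) if length == max_length]
--
--     # 如果只有一个这样的子列表，则返回它
--     if len(max_length_indices) == 1:
--         return lst_of_lists[max_length_indices[0]]
--     else:
--         return []
-- ===== SOURCE B (Python) =====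
-- def find_unique_longest_list(lst_of_lists):
--     if not lst_of_lists:
--         return []
--     best = lst_of_lists[0]
--     count = 1
--     for sub in lst_of_lists[1:]:
--         if len(sub) > len(best):
--             best = sub
--             count = 1
--         elif len(sub) == len(best):
--             count += 1
--     return best if count == 1 else []
-- ===== Notes on version B (the rewrite author's own statement) =====
-- stated objective: simpler
-- what changed: Single running-max pass keeping the current best sublist and a tie counter, instead of building a lengths list, taking its max, and collecting all matching indices in separate passes.
import Mathlib
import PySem

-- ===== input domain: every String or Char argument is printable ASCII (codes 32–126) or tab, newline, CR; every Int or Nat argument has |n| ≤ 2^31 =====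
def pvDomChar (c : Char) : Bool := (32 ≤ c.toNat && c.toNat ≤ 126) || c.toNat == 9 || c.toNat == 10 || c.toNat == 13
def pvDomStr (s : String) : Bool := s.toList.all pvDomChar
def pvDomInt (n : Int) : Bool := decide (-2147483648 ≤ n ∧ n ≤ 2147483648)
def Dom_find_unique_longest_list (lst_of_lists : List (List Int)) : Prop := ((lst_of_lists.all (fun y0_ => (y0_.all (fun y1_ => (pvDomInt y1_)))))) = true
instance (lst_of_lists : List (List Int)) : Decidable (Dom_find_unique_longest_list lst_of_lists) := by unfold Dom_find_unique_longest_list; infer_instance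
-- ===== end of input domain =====

-- B replaces A's three passes (lengths list, max, matching-index list) by one running-max
-- pass carrying the current best sublist and a tie counter; same O(n) cost, simpler.

-- ===== PORT A =====
def find_unique_longest_list (lst_of_lists : List (List Int)) : List Int :=
  if lst_of_lists = [] then []
  else
    let lengths : List Int := lst_of_lists.map (fun sublist => (sublist.length : Int))
    match PySem.List.max? lengths (fun x => x) with
    | none => []  -- unreachable: lengths is nonempty here
    | some max_length =>
      let max_length_indices : List Int :=
        ((PySem.List.enumerate lengths 0).filter (fun p => p.2 == max_length)).map (fun p => p.1)
      if max_length_indices.length = 1 then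
        match PySem.List.pyGet? max_length_indices 0 with
        | none => []  -- unreachable: the list has length 1
        | some i =>
          match PySem.List.pyGet? lst_of_lists i with
          | none => []  -- unreachable: i is an in-range index
          | some r => r
      else []

-- ===== PORT B =====
def find_unique_longest_list_alt (lst_of_lists : List (List Int)) : List Int :=
  match lst_of_lists with
  | [] => []
  | h :: t =>
    let res := t.foldl (fun (s : List Int × Nat) sub =>
        if sub.length > s.1.length then (sub, 1)
        else if sub.length = s.1.length then (s.1, s.2 + 1)
        else s) (h, 1)
    if res.2 = 1 then res.1 else []

-- ===== PRECONDITION & SPEC =====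
def Spec_find_unique_longest_list (lst_of_lists : List (List Int)) (out : List Int) : Prop := out = find_unique_longest_list_alt lst_of_lists
instance (lst_of_lists : List (List Int)) (out : List Int) : Decidable (Spec_find_unique_longest_list lst_of_lists out) := by unfold Spec_find_unique_longest_list; infer_instance

-- ===== CLAIM (what is proved, stated in full; the proofs are below) =====
def Claim_equal_find_unique_longest_list : Prop := ∀ (lst_of_lists : List (List Int)), Dom_find_unique_longest_list lst_of_lists → Spec_find_unique_longest_list lst_of_lists (find_unique_longest_list lst_of_lists)

-- ===== LEMMAS AND PROOFS =====

-- B's fold invariant: the state (best, count) summarizes the prefix seen so far.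
def pvInv (p : List (List Int)) (s : List Int × Nat) : Prop :=
  s.1 ∈ p ∧ (∀ x ∈ p, x.length ≤ s.1.length) ∧
  p.find? (fun x => x.length == s.1.length) = some s.1 ∧
  s.2 = p.countP (fun x => x.length == s.1.length)

theorem pv_fold_inv (t : List (List Int)) : ∀ (p : List (List Int)) (s : List Int × Nat),
    pvInv p s →
    pvInv (p ++ t) (t.foldl (fun (s : List Int × Nat) sub =>
        if sub.length > s.1.length then (sub, 1)
        else if sub.length = s.1.length then (s.1, s.2 + 1)
        else s) s) := by
  induction t with
  | nil => intro p s h; simpa using h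
  | cons x t ih =>
    intro p s h
    obtain ⟨hmem, hbd, hfind, hcnt⟩ := h
    have hstep : pvInv (p ++ [x])
        (if x.length > s.1.length then (x, 1)
         else if x.length = s.1.length then (s.1, s.2 + 1) else s) := by
      by_cases hgt : x.length > s.1.length
      · simp only [if_pos hgt]
        refine ⟨by simp, ?_, ?_, ?_⟩
        · intro y hy
          rcases List.mem_append.1 hy with hy | hy
          · exact le_of_lt (lt_of_le_of_lt (hbd y hy) hgt)
          · simp at hy; simp [hy]
        · have hnone : p.find? (fun z => z.length == x.length) = none := by
            rw [List.find?_eq_none]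
            intro y hy
            have := hbd y hy
            simp only [beq_iff_eq]
            omega
          simp [List.find?_append, hnone]
        · have hz : p.countP (fun z => z.length == x.length) = 0 := by
            rw [List.countP_eq_zero]
            intro y hy
            have := hbd y hy
            simp only [beq_iff_eq]
            omega
          simp [List.countP_append, hz]
      · by_cases heq : x.length = s.1.length
        · simp only [if_neg hgt, if_pos heq]
          refine ⟨by simp [hmem], ?_, ?_, ?_⟩
          · intro y hy
            rcases List.mem_append.1 hy with hy | hy
            · exact hbd y hy
            · simp at hy; simp [hy, heq]
          · simp [List.find?_append, hfind]
          · simp [List.countP_append, heq, ← hcnt]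
        · simp only [if_neg hgt, if_neg heq]
          refine ⟨by simp [hmem], ?_, ?_, ?_⟩
          · intro y hy
            rcases List.mem_append.1 hy with hy | hy
            · exact hbd y hy
            · simp at hy; subst hy; omega
          · simp [List.find?_append, hfind]
          · simp [List.countP_append, heq, ← hcnt]
    have := ih (p ++ [x]) _ hstep
    simpa using this

-- enumerate/filter/map-fst over the mapped lengths list, characterised against the source list.
theorem pv_enum_len (M : Int) : ∀ (l : List (List Int)) (k : Int),
    (((PySem.List.enumerate (l.map (fun s => (s.length : Int))) k).filter
        (fun p => p.2 == M)).map (fun p => p.1)).length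
      = l.countP (fun x => ((x.length : Int) == M)) := by
  intro l
  induction l with
  | nil => intro k; simp [PySem.List.enumerate_nil]
  | cons h t ih =>
    intro k
    by_cases hq : ((h.length : Int) == M)
    · simp [PySem.List.enumerate_cons, hq, ih (k + 1)]
    · simp [PySem.List.enumerate_cons, hq, ih (k + 1)]

theorem pv_enum_head (M : Int) : ∀ (l : List (List Int)) (k : Nat) (i : Int),
    (((PySem.List.enumerate (l.map (fun s => (s.length : Int))) (k : Int)).filter
        (fun p => p.2 == M)).map (fun p => p.1)).head? = some i →
    ∃ (j : Nat) (x : List Int), i = ((k + j : Nat) : Int) ∧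
        l[j]? = some x ∧ l.find? (fun x => ((x.length : Int) == M)) = some x := by
  intro l
  induction l with
  | nil => intro k i hi; simp [PySem.List.enumerate_nil] at hi
  | cons h t ih =>
    intro k i hi
    have hcast : ((k : Int) + 1) = ((k + 1 : Nat) : Int) := by push_cast; ring
    by_cases hq : ((h.length : Int) == M)
    · simp only [List.map_cons, PySem.List.enumerate_cons, List.filter_cons, hq, if_pos,
        List.head?_cons, Option.some.injEq] at hi
      exact ⟨0, h, by omega, by simp, by simp [hq]⟩
    · simp only [List.map_cons, PySem.List.enumerate_cons, List.filter_cons, hq,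
        Bool.false_eq_true, if_false] at hi
      rw [hcast] at hi
      obtain ⟨j, x, hij, hget, hfind⟩ := ih (k + 1) i hi
      refine ⟨j + 1, x, by omega, by simpa using hget, ?_⟩
      simp [hq, hfind]

-- ===== VERDICT (by name: the statement is the Claim_ definition above) =====
theorem find_unique_longest_list_spec : Claim_equal_find_unique_longest_list := by
  intro l _
  unfold Spec_find_unique_longest_list
  match l with
  | [] => rfl
  | h :: t =>
    have hinv : pvInv (h :: t)
        (t.foldl (fun (s : List Int × Nat) sub =>
          if sub.length > s.1.length then (sub, 1)
          else if sub.length = s.1.length then (s.1, s.2 + 1)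
          else s) (h, 1)) := by
      have := pv_fold_inv t [h] (h, 1) ⟨by simp, by simp, by simp, by simp⟩
      simpa using this
    set s := t.foldl (fun (s : List Int × Nat) sub =>
          if sub.length > s.1.length then (sub, 1)
          else if sub.length = s.1.length then (s.1, s.2 + 1)
          else s) (h, 1) with hs
    obtain ⟨hmem, hbd, hfind, hcnt⟩ := hinv
    simp only [find_unique_longest_list, find_unique_longest_list_alt, ← hs,
      if_neg (List.cons_ne_nil h t)]
    cases hmax : PySem.List.max? ((h :: t).map (fun sublist => (sublist.length : Int)))
        (fun x => x) with
    | none =>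
      rw [PySem.List.max?_eq_none_iff] at hmax
      simp at hmax
    | some M =>
      -- M is the maximum length, i.e. M = s.1.length
      have hMmem := PySem.List.max?_mem hmax
      have hMmax := PySem.List.max?_isMax hmax
      obtain ⟨x0, hx0mem, hx0⟩ := List.mem_map.1 hMmem
      have hMle : M ≤ (s.1.length : Int) := by
        rw [← hx0]; exact_mod_cast hbd x0 hx0mem
      have hleM : (s.1.length : Int) ≤ M := by
        have := hMmax ((s.1.length : Int)) (List.mem_map.2 ⟨s.1, hmem, rfl⟩)
        simpa using this
      have hM : M = (s.1.length : Int) := le_antisymm hMle hleM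
      subst hM
      dsimp only
      -- predicates over Int-cast lengths and Nat lengths coincide
      have hpred : (fun (x : List Int) => ((x.length : Int) == (s.1.length : Int)))
          = (fun (x : List Int) => (x.length == s.1.length)) := by
        funext x
        simp [Nat.cast_inj]
      have hlen := pv_enum_len ((s.1.length : Int)) (h :: t) 0
      rw [hpred, ← hcnt] at hlen
      by_cases h1 : s.2 = 1
      · -- unique longest: A returns the element at the unique index, B returns s.1
        rw [h1] at hlen
        obtain ⟨i, hi⟩ := List.length_eq_one_iff.1 hlen
        rw [hi]
        have hhead : (((PySem.List.enumerate ((h :: t).map (fun s => (s.length : Int)))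
            ((0 : Nat) : Int)).filter (fun p => p.2 == (s.1.length : Int))).map
            (fun p => p.1)).head? = some i := by
          rw [show (((0 : Nat) : Int)) = (0 : Int) by simp, hi]; rfl
        obtain ⟨j, x, hij, hget, hfound⟩ := pv_enum_head ((s.1.length : Int)) (h :: t) 0 i hhead
        rw [hpred, hfind] at hfound
        have hxs : x = s.1 := by symm; simpa using hfound
        subst hxs
        rw [if_pos (by simp)]
        rw [show PySem.List.pyGet? [i] 0 = some i from rfl]
        dsimp only
        rw [hij, PySem.List.pyGet?_natCast]
        simp only [Nat.zero_add] at hget ⊢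
        rw [hget, h1, if_pos rfl]
      · -- tie (or none): both return []
        rw [hlen, if_neg h1, if_neg h1]
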